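-- pv_equiv track=rewrite | github.com/juho5005/Programmers | Lv_2_OrderBy/21_n^2 배열 자르기.py | solution
-- ===== SOURCE A (Python) =====
-- def solution(n, left, right):
--     dic = {}
--
--     idx = 0
--     for i in range(1, n+1) :
--         dic[idx] = i
--         idx += 1
--
--     ans = []
--     for k in range(left, right+1) :
--         l_q = k//n
--         l_r = k%n
--         l_ans = 0
--
--         if l_q == 0 :
--             l_ans = dic[l_r]
--         elif l_q == n-1 :
--             l_ans = n
--         else :
--             std = dic[0] + l_q
--             if std >= dic[l_r] :
--                 l_ans = std
--             else :
--                 l_ans = dic[l_r]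
--         ans.append(l_ans)
--     return ans
-- ===== SOURCE B (Python) =====
-- def solution(n, left, right):
--     if right < left:
--         return []
--     out = []
--     for r in range(left // n, right // n + 1):
--         row = [r + 1] * max(min(r + 1, n), 0) + list(range(max(r + 2, 1), n + 1))
--         lo = max(left - r * n, 0)
--         hi = right - r * n + 1
--         out += row[lo:hi]
--     return out
-- ===== Notes on version B (the rewrite author's own statement) =====
-- stated objective: faster
-- what changed: Instead of A's O(n) dict build plus a per-index three-way branch, B iterates over the ROWS the slice touches, materialises each row as a constant run [r+1]*(r+1) concatenated with the arithmetic run r+2..n, and appends the slice row[lo:hi] of it, so the work is bulk list construction per row with no per-element division or branching.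
-- outside the precondition, e.g. on solution(-2, 5, 6): A returns [-2, -2], B returns []
import Mathlib
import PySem

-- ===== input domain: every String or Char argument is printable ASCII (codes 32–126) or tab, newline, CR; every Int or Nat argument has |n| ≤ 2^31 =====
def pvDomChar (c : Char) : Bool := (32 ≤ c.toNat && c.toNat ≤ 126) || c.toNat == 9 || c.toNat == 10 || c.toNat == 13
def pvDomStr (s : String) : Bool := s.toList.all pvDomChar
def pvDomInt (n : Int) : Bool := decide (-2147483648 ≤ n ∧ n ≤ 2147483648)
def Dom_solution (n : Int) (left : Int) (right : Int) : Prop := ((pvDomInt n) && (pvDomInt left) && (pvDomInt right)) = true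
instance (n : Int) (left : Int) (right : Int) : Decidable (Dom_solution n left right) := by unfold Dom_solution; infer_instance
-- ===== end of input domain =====

-- B iterates over the ROWS of the n×n grid touched by [left, right], materialises each row as a
-- constant run plus an arithmetic run and appends a slice of it, instead of A's O(n) dict build
-- plus a per-index three-way branch (faster; a timing run measures the speed-up).

-- ===== PORT A =====
-- A's dict-building loop: state is (dic, idx). idx is fresh (strictly increasing) at every
-- iteration, so Python's dic[idx] = i appends the pair (idx, i) to the dict's items;
-- the loop accumulates the items front-to-back (reversed at the end to keep insertion order)
-- so that evaluation is linear, not quadratic.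
def solutionBuild (n : Int) : PySem.Dict Int Int × Int :=
  let st := (PySem.List.pyRange 1 (n + 1) 1).foldl
    (fun (st : List (Int × Int) × Int) i => ((st.2, i) :: st.1, st.2 + 1)) ([], 0)
  (PySem.Dict.mk st.1.reverse, st.2)

def solution (n : Int) (left : Int) (right : Int) : List Int :=
  let dic := (solutionBuild n).1
  (PySem.List.pyRange left (right + 1) 1).foldl
    (fun ans k =>
      let l_q := PySem.Int.floordiv k n
      let l_r := PySem.Int.mod k n
      let l_ans :=
        if l_q = 0 then dic.getD l_r 0
        else if l_q = n - 1 then n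
        else
          let std := dic.getD 0 0 + l_q
          if std ≥ dic.getD l_r 0 then std else dic.getD l_r 0
      ans ++ [l_ans]) []

-- ===== PORT B =====
-- row r of the grid is [r+1]*max(min(r+1,n),0) ++ range(max(r+2,1), n+1); B appends row[lo:hi]
def solution_alt (n : Int) (left : Int) (right : Int) : List Int :=
  if right < left then []
  else
    (PySem.List.pyRange (PySem.Int.floordiv left n) (PySem.Int.floordiv right n + 1) 1).foldl
      (fun out r =>
        let row := List.replicate (max (min (r + 1) n) 0).toNat (r + 1)
                     ++ PySem.List.pyRange (max (r + 2) 1) (n + 1) 1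
        let lo := max (left - r * n) 0
        let hi := right - r * n + 1
        out ++ PySem.List.slice row (some lo) (some hi)) []

-- ===== PRECONDITION & SPEC =====
-- Pre_ excludes n ≤ 0 with a nonempty index range: there A raises ZeroDivisionError (n = 0) or
-- KeyError (n < 0), except the accidental corner where every k//n equals n-1, whose value is an artefact.
def Pre_solution (n : Int) (left : Int) (right : Int) : Prop := 1 ≤ n ∨ right < left
instance (n : Int) (left : Int) (right : Int) : Decidable (Pre_solution n left right) := by unfold Pre_solution; infer_instance
def pvWitness_solution : Int × Int × Int := (3, 2, 7)
def Spec_solution (n : Int) (left : Int) (right : Int) (out : List Int) : Prop := out = solution_alt n left right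
instance (n : Int) (left : Int) (right : Int) (out : List Int) : Decidable (Spec_solution n left right out) := by unfold Spec_solution; infer_instance

-- ===== CLAIM (what is proved, stated in full; the proofs are below) =====
def Claim_equal_solution : Prop := ∀ (n : Int) (left : Int) (right : Int), Dom_solution n left right → Pre_solution n left right → Spec_solution n left right (solution n left right)

-- ===== LEMMAS AND PROOFS =====

-- the cell value both programs compute at flat index k
def rowVal (n k : Int) : Int := max (PySem.Int.floordiv k n) (PySem.Int.mod k n) + 1

-- ---------- A-side: A = map (rowVal n) over the index range ----------

-- invariant of A's dict-building loop: after processing 1..n, idx = n and the accumulated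
-- items are pairs (r, r+1) with distinct keys 0 <= r < n, each present exactly where expected
theorem solutionBuild_fold_invariant (n : Int) (hn : 1 ≤ n) :
    ((PySem.List.pyRange 1 (n + 1) 1).foldl
        (fun (st : List (Int × Int) × Int) i => ((st.2, i) :: st.1, st.2 + 1)) ([], 0)).2 = n ∧
      (∀ p ∈ ((PySem.List.pyRange 1 (n + 1) 1).foldl
        (fun (st : List (Int × Int) × Int) i => ((st.2, i) :: st.1, st.2 + 1)) ([], 0)).1,
          0 ≤ p.1 ∧ p.1 < n) ∧
      (((PySem.List.pyRange 1 (n + 1) 1).foldl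
        (fun (st : List (Int × Int) × Int) i => ((st.2, i) :: st.1, st.2 + 1)) ([], 0)).1.map
          Prod.fst).Nodup ∧
      (∀ r : Int, 0 ≤ r → r < n → (r, r + 1) ∈ ((PySem.List.pyRange 1 (n + 1) 1).foldl
        (fun (st : List (Int × Int) × Int) i => ((st.2, i) :: st.1, st.2 + 1)) ([], 0)).1) := by
  induction n, hn using Int.le_induction with
  | base =>
      refine ⟨rfl, ?_, by decide, ?_⟩
      · intro p hp
        have hl : ((PySem.List.pyRange 1 (1 + 1) 1).foldl
            (fun (st : List (Int × Int) × Int) i => ((st.2, i) :: st.1, st.2 + 1)) ([], 0)).1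
            = [((0 : Int), (1 : Int))] := by decide
        rw [hl, List.mem_singleton] at hp
        subst hp; exact ⟨le_refl 0, by norm_num⟩
      · intro r h0 h1
        have : r = 0 := by omega
        subst this; decide
  | succ m hm ih =>
      rw [show m + 1 + 1 = (m + 1) + 1 from rfl,
        PySem.List.pyRange_one_succ_right (by omega : (1:Int) ≤ m + 1), List.foldl_append]
      simp only [List.foldl_cons, List.foldl_nil, ih.1]
      refine ⟨trivial, ?_, ?_, ?_⟩
      · intro p hp
        rcases List.mem_cons.mp hp with h | h
        · subst h; constructor <;> omega
        · have := ih.2.1 p h; omega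
      · rw [List.map_cons]
        refine List.nodup_cons.mpr ⟨?_, ih.2.2.1⟩
        intro hmem
        rcases List.mem_map.mp hmem with ⟨p, hp, hfst⟩
        have := ih.2.1 p hp; omega
      · intro r h0 h1
        by_cases h : r = m
        · subst h; exact List.mem_cons_self
        · exact List.mem_cons_of_mem _ (ih.2.2.2 r h0 (by omega))

-- hence every lookup the main loop performs returns r + 1
theorem solutionBuild_getD (n : Int) (hn : 1 ≤ n) (r : Int) (h0 : 0 ≤ r) (h1 : r < n) :
    (solutionBuild n).1.getD r 0 = r + 1 := by
  obtain ⟨-, -, hnd, hmem⟩ := solutionBuild_fold_invariant n hn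
  have h1 : (r, r + 1) ∈ ((solutionBuild n).1).items := by
    simpa [solutionBuild, PySem.Dict.items] using List.mem_reverse.mpr (hmem r h0 h1)
  have h2 : ((solutionBuild n).1).keys.Nodup := by
    simpa [solutionBuild, PySem.Dict.keys, PySem.Dict.items, List.map_reverse] using hnd
  exact PySem.Dict.getD_of_mem_items _ h1 h2 0

theorem solution_body_eq (n k : Int) (hn : 1 ≤ n) :
    (let dic := (solutionBuild n).1
     let l_q := PySem.Int.floordiv k n
     let l_r := PySem.Int.mod k n
     if l_q = 0 then dic.getD l_r 0
     else if l_q = n - 1 then n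
     else
       let std := dic.getD 0 0 + l_q
       if std ≥ dic.getD l_r 0 then std else dic.getD l_r 0)
      = rowVal n k := by
  have hpos : (0 : Int) < n := by omega
  have hr0 : 0 ≤ PySem.Int.mod k n := PySem.Int.mod_nonneg k hpos
  have hr1 : PySem.Int.mod k n < n := PySem.Int.mod_lt k hpos
  have hdr : (solutionBuild n).1.getD (PySem.Int.mod k n) 0 = PySem.Int.mod k n + 1 :=
    solutionBuild_getD n hn _ hr0 hr1
  have hd0 : (solutionBuild n).1.getD 0 0 = 1 := by
    have := solutionBuild_getD n hn 0 (by omega) hpos; simpa using this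
  simp only [hdr, hd0, rowVal]
  by_cases hq0 : PySem.Int.floordiv k n = 0
  · simp [hq0]; omega
  · by_cases hq1 : PySem.Int.floordiv k n = n - 1
    · simp [hq1]; omega
    · simp [hq1]
      split_ifs <;> omega

theorem solution_eq_map (n left right : Int) (hn : 1 ≤ n) :
    solution n left right = (PySem.List.pyRange left (right + 1) 1).map (rowVal n) := by
  unfold solution
  rw [PySem.List.foldl_append_singleton_eq_map]
  exact List.map_congr_left (fun k _ => solution_body_eq n k hn)

-- ---------- B-side: generic pyRange plumbing specialised to B's shapes ----------

theorem pyRange_map_add (a b t : Int) :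
    (PySem.List.pyRange a b 1).map (fun k => k + t) = PySem.List.pyRange (a + t) (b + t) 1 := by
  rw [PySem.List.pyRange_one a b, PySem.List.pyRange_one (a + t) (b + t), List.map_map]
  have hlen : (b + t - (a + t)).toNat = (b - a).toNat := by omega
  rw [hlen]
  exact List.map_congr_left (fun k _ => by simp [Function.comp]; ring)

theorem drop_pyRange (a b : Int) (j : Nat) :
    (PySem.List.pyRange a b 1).drop j = PySem.List.pyRange (a + j) b 1 := by
  apply List.ext_getElem
  · simp [PySem.List.length_pyRange_one]; omega
  · intro i h1 h2
    rw [List.getElem_drop]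
    rw [PySem.List.getElem_pyRange_one, PySem.List.getElem_pyRange_one]
    push_cast; ring

theorem take_pyRange (a b : Int) (j : Nat) :
    (PySem.List.pyRange a b 1).take j = PySem.List.pyRange a (min b (a + j)) 1 := by
  apply List.ext_getElem
  · simp [PySem.List.length_pyRange_one]; omega
  · intro i h1 h2
    rw [List.getElem_take]
    rw [PySem.List.getElem_pyRange_one, PySem.List.getElem_pyRange_one]

-- B's materialised row r is exactly the cell values of flat indices r*n .. (r+1)*n - 1
theorem row_eq (n r : Int) (hn : 1 ≤ n) :
    List.replicate (max (min (r + 1) n) 0).toNat (r + 1)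
        ++ PySem.List.pyRange (max (r + 2) 1) (n + 1) 1
      = (PySem.List.pyRange (r * n) ((r + 1) * n) 1).map (rowVal n) := by
  have hpos : (0 : Int) < n := by omega
  set c : Int := max (min (r + 1) n) 0 with hc
  have hc0 : 0 ≤ c := by omega
  have hcn : c ≤ n := by omega
  have hrw : (r + 1) * n = r * n + n := by ring
  rw [hrw, PySem.List.pyRange_one_append (r * n) (r * n + c) (r * n + n)
      (by omega) (by omega), List.map_append]
  have hval : ∀ k, r * n ≤ k → k < r * n + n →
      PySem.Int.floordiv k n = r ∧ PySem.Int.mod k n = k - r * n := by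
    intro k h1 h2
    have hq : PySem.Int.floordiv k n = r :=
      (PySem.Int.floordiv_eq_iff_of_pos hpos).mpr ⟨h1, by rw [hrw]; omega⟩
    refine ⟨hq, ?_⟩
    have := PySem.Int.floordiv_mul_add_mod k n
    rw [hq] at this; omega
  congr 1
  · -- constant run
    have h1 : ∀ k ∈ PySem.List.pyRange (r * n) (r * n + c) 1, rowVal n k = r + 1 := by
      intro k hk
      rw [PySem.List.mem_pyRange_one] at hk
      obtain ⟨hq, hm⟩ := hval k hk.1 (by omega)
      simp only [rowVal, hq, hm]; omega
    rw [List.map_congr_left h1, List.map_const']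
    rw [PySem.List.length_pyRange_one]
    congr 1; omega
  · -- arithmetic run
    have h1 : ∀ k ∈ PySem.List.pyRange (r * n + c) (r * n + n) 1,
        rowVal n k = k + (1 - r * n) := by
      intro k hk
      rw [PySem.List.mem_pyRange_one] at hk
      obtain ⟨hq, hm⟩ := hval k (by omega) hk.2
      simp only [rowVal, hq, hm]; omega
    rw [List.map_congr_left h1, pyRange_map_add]
    have e1 : r * n + c + (1 - r * n) = c + 1 := by ring
    have e2 : r * n + n + (1 - r * n) = n + 1 := by ring
    rw [e1, e2]
    by_cases hlt : c < n
    · congr 1; omega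
    · rw [PySem.List.pyRange_one_eq_nil (by omega),
        PySem.List.pyRange_one_eq_nil (by omega)]

-- slicing B's row r with B's bounds picks out the cell values of max(left, r*n) .. min(right, (r+1)*n - 1)
theorem slice_row_eq (n left right r : Int) (hn : 1 ≤ n) (hlr : left ≤ right)
    (hr : r * n ≤ right) :
    PySem.List.slice ((PySem.List.pyRange (r * n) ((r + 1) * n) 1).map (rowVal n))
        (some (max (left - r * n) 0)) (some (right - r * n + 1))
      = (PySem.List.pyRange (max left (r * n)) (min (right + 1) ((r + 1) * n)) 1).map
          (rowVal n) := by
    set lo : Int := max (left - r * n) 0 with hlo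
    set hi : Int := right - r * n + 1 with hhi
    have h0lo : 0 ≤ lo := by omega
    have h0hi : 0 ≤ hi := by omega
    have hlohi : lo ≤ hi := by omega
    rw [PySem.List.slice_toNat _ h0lo h0hi, ← List.map_drop, ← List.map_take,
      drop_pyRange, take_pyRange]
    have e1 : r * n + (lo.toNat : Int) = max left (r * n) := by omega
    have e2 : r * n + (lo.toNat : Int) + ((hi.toNat - lo.toNat : Nat) : Int)
        = right + 1 := by omega
    rw [e1]
    have e3 : max left (r * n) + ((hi.toNat - lo.toNat : Nat) : Int) = right + 1 := by omega
    rw [e3]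
    rw [min_comm ((r + 1) * n) (right + 1)]

-- concatenating the sliced rows reconstitutes the full index range
theorem rows_concat (n left right : Int) (hn : 1 ≤ n) (hlr : left ≤ right) :
    ∀ (j : Nat) (s : Int), PySem.Int.floordiv left n ≤ s →
      s + j = PySem.Int.floordiv right n + 1 →
      (PySem.List.pyRange s (PySem.Int.floordiv right n + 1) 1).flatMap
          (fun r => PySem.List.pyRange (max left (r * n)) (min (right + 1) ((r + 1) * n)) 1)
        = PySem.List.pyRange (max left (s * n)) (right + 1) 1 := by
  have hpos : (0 : Int) < n := by omega
  have hLbr := (PySem.Int.floordiv_eq_iff_of_pos hpos (a := left)).mp rfl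
  have hRbr := (PySem.Int.floordiv_eq_iff_of_pos hpos (a := right)).mp rfl
  intro j
  induction j with
  | zero =>
      intro s hs he
      have hsv : s = PySem.Int.floordiv right n + 1 := by omega
      subst hsv
      rw [PySem.List.pyRange_one_eq_nil (by omega), List.flatMap_nil,
        PySem.List.pyRange_one_eq_nil (by have := hRbr.2; omega)]
  | succ j ih =>
      intro s hs he
      have hsle : s ≤ PySem.Int.floordiv right n := by omega
      rw [PySem.List.pyRange_one_cons (by omega), List.flatMap_cons,
        ih (s + 1) (by omega) (by omega)]
      have hsn : s * n ≤ PySem.Int.floordiv right n * n :=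
        mul_le_mul_of_nonneg_right hsle (by omega)
      have hs1 : left < (s + 1) * n := by
        have h1 : (PySem.Int.floordiv left n + 1) * n ≤ (s + 1) * n :=
          mul_le_mul_of_nonneg_right (by omega) (by omega)
        have := hLbr.2
        omega
      have hmax : max left ((s + 1) * n) = (s + 1) * n := by omega
      rw [hmax]
      by_cases hcase : (s + 1) * n ≤ right + 1
      · have hmin : min (right + 1) ((s + 1) * n) = (s + 1) * n := by omega
        rw [hmin, ← PySem.List.pyRange_one_append (max left (s * n)) ((s + 1) * n) (right + 1)
          ?_ hcase]
        have : s * n < (s + 1) * n := by nlinarith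
        omega
      · have hmin : min (right + 1) ((s + 1) * n) = right + 1 := by omega
        rw [hmin, PySem.List.pyRange_one_eq_nil (by omega : right + 1 ≤ (s + 1) * n),
          List.append_nil]

theorem solution_alt_eq_map (n left right : Int) (hn : 1 ≤ n) :
    solution_alt n left right = (PySem.List.pyRange left (right + 1) 1).map (rowVal n) := by
  unfold solution_alt
  by_cases hlr : right < left
  · rw [if_pos hlr, PySem.List.pyRange_one_eq_nil (by omega)]; rfl
  · rw [if_neg hlr]
    have hpos : (0 : Int) < n := by omega
    have hLbr := (PySem.Int.floordiv_eq_iff_of_pos hpos (a := left)).mp rfl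
    have hRbr := (PySem.Int.floordiv_eq_iff_of_pos hpos (a := right)).mp rfl
    rw [PySem.List.foldl_append_eq_flatMap]
    have hbody : ∀ r ∈ PySem.List.pyRange (PySem.Int.floordiv left n)
        (PySem.Int.floordiv right n + 1) 1,
        PySem.List.slice
            (List.replicate (max (min (r + 1) n) 0).toNat (r + 1)
              ++ PySem.List.pyRange (max (r + 2) 1) (n + 1) 1)
            (some (max (left - r * n) 0)) (some (right - r * n + 1))
          = (PySem.List.pyRange (max left (r * n)) (min (right + 1) ((r + 1) * n)) 1).map
              (rowVal n) := by
      intro r hrmem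
      rw [PySem.List.mem_pyRange_one] at hrmem
      have hrn : r * n ≤ PySem.Int.floordiv right n * n :=
        mul_le_mul_of_nonneg_right (by omega) (by omega)
      rw [row_eq n r hn]
      exact slice_row_eq n left right r hn (by omega) (by omega)
    have hfd : PySem.Int.floordiv left n ≤ PySem.Int.floordiv right n := by
      rw [PySem.Int.le_floordiv_iff_mul_le hpos]
      omega
    rw [List.flatMap_congr hbody, ← List.map_flatMap,
      rows_concat n left right hn (by omega)
        ((PySem.Int.floordiv right n + 1) - PySem.Int.floordiv left n).toNat
        (PySem.Int.floordiv left n) le_rfl (by omega)]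
    have hstart : max left (PySem.Int.floordiv left n * n) = left := by omega
    rw [hstart]
    exact List.nil_append _

-- ===== VERDICT (by name: the statement is the Claim_ definition above) =====
theorem solution_spec : Claim_equal_solution := by
  intro n left right _ hpre
  unfold Spec_solution
  by_cases hn : 1 ≤ n
  · rw [solution_eq_map n left right hn, solution_alt_eq_map n left right hn]
  · have hlt : right < left := by rcases hpre with h | h <;> omega
    unfold solution solution_alt
    rw [if_pos hlt, PySem.List.pyRange_one_eq_nil (by omega : right + 1 ≤ left)]
    rfl
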